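-- pv_equiv track=rewrite | github.com/BurhanAnis/PDF_Parser | app.py | search_for_terms_and_count
-- ===== SOURCE A (Python) =====
-- from collections import defaultdict
--
-- def search_for_terms_and_count(text, key_terms):
--     term_counts = defaultdict(int)  # Default to 0 for each key term
--     lower_text = text.lower()
--     for term in key_terms:
--         count = lower_text.count(term.lower())
--         if count > 0:
--             term_counts[term] += count
--     return term_counts
-- ===== SOURCE B (Python) =====
-- def search_for_terms_and_count(text, key_terms):
--     lower_text = text.lower()
--     # multiplicity of each distinct term, first-occurrence order
--     occ = {}
--     for term in key_terms:
--         occ[term] = occ.get(term, 0) + 1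
--     result = {}
--     for term, m in occ.items():
--         t = term.lower()
--         c = 0
--         i = lower_text.find(t)
--         while i != -1:
--             c += 1
--             i = lower_text.find(t, i + max(len(t), 1))  # advance at least one position
--         if c:
--             result[term] = c * m
--     return result
-- ===== Notes on version B (the rewrite author's own statement) =====
-- stated objective: alternative
-- what changed: B deduplicates the term list into multiplicities first and counts each distinct term once with an explicit find-and-jump scan (str.find advancing past each match, at least one position per step), instead of A's defaultdict accumulation that re-runs str.count for every (possibly repeated) term.
import Mathlib
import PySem

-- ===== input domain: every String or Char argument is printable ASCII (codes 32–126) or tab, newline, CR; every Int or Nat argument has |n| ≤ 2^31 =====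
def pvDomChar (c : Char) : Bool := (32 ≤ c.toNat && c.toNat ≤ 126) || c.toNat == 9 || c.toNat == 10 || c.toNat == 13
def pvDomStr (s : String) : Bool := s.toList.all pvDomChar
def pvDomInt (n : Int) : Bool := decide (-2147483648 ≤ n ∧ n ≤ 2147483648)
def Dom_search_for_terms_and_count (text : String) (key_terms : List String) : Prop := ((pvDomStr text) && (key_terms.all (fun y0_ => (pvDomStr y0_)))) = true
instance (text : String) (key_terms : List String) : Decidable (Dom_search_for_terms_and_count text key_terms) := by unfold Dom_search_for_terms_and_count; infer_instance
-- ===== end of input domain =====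

-- B replaces A's per-term str.count over the full (possibly duplicated) term list by a
-- dedup-with-multiplicity pass and an explicit find-and-jump scan per distinct term
-- (objective: alternative).

-- ===== PORT A =====
def search_for_terms_and_count (text : String) (key_terms : List String) : List (String × Int) :=
  let lower_text := PySem.Str.lower text
  (key_terms.foldl (fun (d : PySem.Dict String Int) term =>
      let count : Nat := PySem.Str.count lower_text (PySem.Str.lower term)
      if 0 < count then d.insert term (d.getD term 0 + (count : Int)) else d)
    PySem.Dict.empty).items

-- ===== PORT B =====
-- the 'while i != -1' find-and-jump loop of Source B (advance by at least one position per
-- match); the Python loop needs no fuel, the recursion here does: fuel = s.length + 1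
-- bounds the number of matches + 1
def pvFindLoop (s t : List Char) : Nat → Int → Nat → Nat
  | 0, _, c => c
  | fuel + 1, i, c =>
      if i = -1 then c
      else pvFindLoop s t fuel (PySem.Chars.findFrom s t (i + ((max t.length 1 : Nat) : Int)) none) (c + 1)

def pvCount (s t : List Char) : Nat :=
  pvFindLoop s t (s.length + 1) (PySem.Chars.find s t) 0

def search_for_terms_and_count_alt (text : String) (key_terms : List String) : List (String × Int) :=
  let lower_text := (PySem.Str.lower text).toList
  let occ := key_terms.foldl
      (fun (d : PySem.Dict String Int) term => d.insert term (d.getD term 0 + 1))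
      PySem.Dict.empty
  (occ.items.foldl (fun (r : PySem.Dict String Int) p =>
      let c := pvCount lower_text (PySem.Chars.lower p.1.toList)
      if 0 < c then r.insert p.1 ((c : Int) * p.2) else r)
    PySem.Dict.empty).items

-- ===== PRECONDITION & SPEC =====
def Spec_search_for_terms_and_count (text : String) (key_terms : List String) (out : List (String × Int)) : Prop := out = search_for_terms_and_count_alt text key_terms
instance (text : String) (key_terms : List String) (out : List (String × Int)) : Decidable (Spec_search_for_terms_and_count text key_terms out) := by unfold Spec_search_for_terms_and_count; infer_instance

-- ===== CLAIM (what is proved, stated in full; the proofs are below) =====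
def Claim_equal_search_for_terms_and_count : Prop := ∀ (text : String) (key_terms : List String), Dom_search_for_terms_and_count text key_terms → Spec_search_for_terms_and_count text key_terms (search_for_terms_and_count text key_terms)

-- ===== LEMMAS AND PROOFS =====

def pvCnt (t : List Char) : List Char → Nat
  | [] => 0
  | h :: tl =>
      if t.isPrefixOf (h :: tl) then 1 + pvCnt t (tl.drop (t.length - 1))
      else pvCnt t tl
  termination_by l => l.length
  decreasing_by
  · simp
  · simp

theorem pvCnt_eq_zero_of_not_infix (t l : List Char) (h : ¬ t <:+: l) :
    pvCnt t l = 0 := by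
  induction l with
  | nil => simp [pvCnt]
  | cons a tl ih =>
    rw [pvCnt]
    rw [if_neg]
    · exact ih (fun hi => h (List.infix_cons hi))
    · intro hp
      exact h (List.IsPrefix.isInfix (List.isPrefixOf_iff_prefix.mp hp))

theorem pvCnt_first_match (t : List Char) (ht : t ≠ []) :
    ∀ (m : Nat) (l : List Char), t <+: l.drop m → (∀ j, j < m → ¬ t <+: l.drop j) →
      pvCnt t l = 1 + pvCnt t (l.drop (m + t.length)) := by
  intro m
  induction m with
  | zero =>
    intro l hp _
    simp only [List.drop_zero] at hp
    match l, hp with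
    | [], hp => exact absurd (List.prefix_nil.mp hp) ht
    | a :: tl, hp =>
      rw [pvCnt, if_pos (List.isPrefixOf_iff_prefix.mpr hp)]
      congr 1
      have h1 : t.length = (t.length - 1) + 1 := by
        have := List.length_pos_iff.mpr ht; omega
      rw [Nat.zero_add, h1, List.drop_succ_cons]
      norm_num
  | succ m ih =>
    intro l hp hmin
    match l with
    | [] =>
      simp only [List.drop_nil] at hp
      exact absurd (List.prefix_nil.mp hp) ht
    | a :: tl =>
      have hnp : ¬ t.isPrefixOf (a :: tl) := by
        intro hb
        exact hmin 0 (Nat.succ_pos m) (by simpa using List.isPrefixOf_iff_prefix.mp hb)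
      rw [pvCnt, if_neg hnp]
      have := ih tl (by simpa using hp) (fun j hj => by
        have := hmin (j+1) (by omega)
        simpa using this)
      rw [this]
      have h2 : m + 1 + t.length = (m + t.length) + 1 := by omega
      rw [h2, List.drop_succ_cons]

theorem countgo_eq_pvCnt (t : List Char) (ht : t ≠ []) :
    ∀ (fuel : Nat) (l : List Char) (acc : Nat), l.length ≤ fuel →
      PySem.Chars.count.go t fuel l acc = acc + pvCnt t l := by
  intro fuel
  induction fuel with
  | zero =>
    intro l acc hl
    have : l = [] := List.length_eq_zero_iff.mp (Nat.le_zero.mp hl)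
    subst this
    simp [PySem.Chars.count.go, pvCnt]
  | succ fuel ih =>
    intro l acc hl
    match l with
    | [] => simp [PySem.Chars.count.go, pvCnt]
    | a :: tl =>
      rw [PySem.Chars.count.go]
      by_cases hp : t.isPrefixOf (a :: tl)
      · rw [if_pos hp, pvCnt, if_pos hp]
        have h1 : t.length = (t.length - 1) + 1 := by
          have := List.length_pos_iff.mpr ht; omega
        rw [h1, List.drop_succ_cons]
        rw [ih _ _ (by simp at hl ⊢; omega)]
        norm_num
        omega
      · rw [if_neg hp, pvCnt, if_neg hp]
        exact ih _ _ (by simp at hl ⊢; omega)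

theorem pvFindLoop_eq (s t : List Char) (ht : t ≠ []) :
    ∀ (fuel k c : Nat), k ≤ s.length → s.length - k + 1 ≤ fuel →
      pvFindLoop s t fuel (PySem.Chars.findFrom s t (k : Int) none) c = c + pvCnt t (s.drop k) := by
  intro fuel
  induction fuel with
  | zero => intro k c hk hf; omega
  | succ fuel ih =>
    intro k c hk hf
    by_cases hneg : PySem.Chars.findFrom s t (k : Int) none = -1
    · rw [pvFindLoop, if_pos hneg]
      rw [pvCnt_eq_zero_of_not_infix t _
        ((PySem.Chars.findFrom_natCast_eq_neg_one_iff s t k hk).mp hneg)]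
      omega
    · obtain ⟨hkp, hpre, hmin⟩ := PySem.Chars.findFrom_natCast_spec s t k hk hneg
      set p := PySem.Chars.findFrom s t (k : Int) none with hpdef
      have hp0 : 0 ≤ p := le_trans (by exact_mod_cast Int.natCast_nonneg k) hkp
      have hkle : k ≤ p.toNat := by omega
      have htlen : t.length ≤ s.length - p.toNat := by
        have := hpre.length_le
        simpa using this
      have hplen : p.toNat ≤ s.length := by
        by_contra hc
        have : s.drop p.toNat = [] := List.drop_eq_nil_of_le (by omega)
        rw [this] at hpre
        exact ht (List.prefix_nil.mp hpre)
      have ht1 : 1 ≤ t.length := List.length_pos_iff.mpr ht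
      rw [pvFindLoop, if_neg hneg]
      have hmax : (max t.length 1) = t.length := by omega
      have hcast : p + ((max t.length 1 : Nat) : Int) = ((p.toNat + t.length : Nat) : Int) := by
        rw [hmax]; push_cast; omega
      rw [hcast]
      rw [ih (p.toNat + t.length) (c + 1) (by omega) (by omega)]
      have hfm := pvCnt_first_match t ht (p.toNat - k) (s.drop k)
        (by rw [List.drop_drop, show k + (p.toNat - k) = p.toNat from by omega]
            exact hpre)
        (by intro j hj
            rw [List.drop_drop]
            exact hmin (k + j) (by omega) (by omega))
      rw [List.drop_drop] at hfm
      have harith : k + (p.toNat - k + t.length) = p.toNat + t.length := by omega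
      rw [harith] at hfm
      rw [hfm]
      omega

-- for an empty needle the loop advances one position per step and counts every index
theorem pvFindLoop_nil (s : List Char) :
    ∀ (fuel k c : Nat), k + fuel = s.length + 1 →
      pvFindLoop s [] fuel (k : Int) c = c + fuel := by
  intro fuel
  induction fuel with
  | zero => intro k c _; simp [pvFindLoop]
  | succ fuel ih =>
    intro k c hk
    rw [pvFindLoop, if_neg (by omega)]
    match fuel, hk with
    | 0, hk => simp [pvFindLoop]
    | fuel + 1, hk =>
      have hk1 : k + 1 ≤ s.length := by omega
      have hfk : PySem.Chars.findFrom s [] ((k : Int) + ((max (List.length ([] : List Char)) 1 : Nat) : Int)) none = ((k + 1 : Nat) : Int) := by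
        have : ((k : Int) + ((max (List.length ([] : List Char)) 1 : Nat) : Int)) = ((k + 1 : Nat) : Int) := by
          simp only [List.length_nil]
          push_cast
          omega
        rw [this, PySem.Chars.findFrom_natCast s [] (k + 1) hk1]
        simp [PySem.Chars.find_nil]
      rw [hfk, ih (k + 1) (c + 1) (by omega)]
      omega

theorem pvCount_eq_count (s t : List Char) : pvCount s t = PySem.Chars.count s t := by
  by_cases ht : t = []
  · subst ht
    rw [pvCount, PySem.Chars.find_nil, show (0 : Int) = ((0 : Nat) : Int) from rfl,
      pvFindLoop_nil s (s.length + 1) 0 0 (by omega)]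
    simp [PySem.Chars.count]
  · rw [pvCount, PySem.Chars.count,
      if_neg (by simpa [List.isEmpty_iff] using ht)]
    rw [countgo_eq_pvCnt t ht s.length s 0 le_rfl]
    have h0 : PySem.Chars.find s t = PySem.Chars.findFrom s t ((0 : Nat) : Int) none := by
      simp [PySem.Chars.findFrom_zero]
    rw [h0]
    have := pvFindLoop_eq s t ht (s.length + 1) 0 0 (Nat.zero_le _) (by omega)
    simpa using this

theorem A_get? (g : String → Nat) (kts : List String) (term : String) :
    (kts.foldl (fun (d : PySem.Dict String Int) u =>
        if 0 < g u then d.insert u (d.getD u 0 + (g u : Int)) else d)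
      PySem.Dict.empty).get? term =
    (if 0 < g term ∧ term ∈ kts then
      some ((g term : Int) * (kts.count term : Int)) else none) := by
  induction kts using List.reverseRecOn generalizing term with
  | nil => simp [PySem.Dict.get?_empty]
  | append_singleton kts x ih =>
    simp only [List.foldl_append, List.foldl_cons, List.foldl_nil]
    by_cases hgx : 0 < g x
    · rw [if_pos hgx]
      rw [PySem.Dict.get?_insert]
      by_cases hx : term = x
      · subst hx
        rw [if_pos rfl]
        rw [PySem.Dict.getD_eq_get?_getD, ih term]
        by_cases hmem : term ∈ kts
        · rw [if_pos ⟨hgx, hmem⟩]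
          simp only [List.mem_append, List.mem_singleton, hmem, true_or, and_true, hgx, if_pos]
          rw [List.count_append]
          push_cast
          simp
          ring
        · rw [if_neg (by tauto)]
          have h0 : kts.count term = 0 := List.count_eq_zero_of_not_mem hmem
          simp only [List.mem_append, List.mem_singleton, hgx, true_and, or_true, if_pos,
            Option.getD_none]
          rw [List.count_append, h0]
          simp
      · rw [if_neg hx, ih term]
        have hmem : (term ∈ kts ++ [x]) ↔ term ∈ kts := by simp [hx]
        have hcnt : (kts ++ [x]).count term = kts.count term := by
          rw [List.count_append]; simp [Ne.symm hx]
        rw [hcnt]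
        by_cases hc : 0 < g term ∧ term ∈ kts
        · rw [if_pos hc, if_pos ⟨hc.1, hmem.mpr hc.2⟩]
        · rw [if_neg hc, if_neg (by rw [hmem]; exact hc)]
    · rw [if_neg hgx, ih term]
      by_cases hx : term = x
      · subst hx
        rw [if_neg (by tauto), if_neg (by tauto)]
      · have hcnt : (kts ++ [x]).count term = kts.count term := by
          rw [List.count_append]; simp [Ne.symm hx]
        rw [hcnt]
        by_cases hc : 0 < g term ∧ term ∈ kts
        · rw [if_pos hc, if_pos ⟨hc.1, by simp [hc.2]⟩]
        · rw [if_neg hc, if_neg (by simp [hx]; tauto)]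

theorem A_contains (g : String → Nat) (kts : List String) (term : String) :
    (kts.foldl (fun (d : PySem.Dict String Int) u =>
        if 0 < g u then d.insert u (d.getD u 0 + (g u : Int)) else d)
      PySem.Dict.empty).contains term = decide (0 < g term ∧ term ∈ kts) := by
  rw [PySem.Dict.contains_eq_isSome_get?, A_get?]
  by_cases hc : 0 < g term ∧ term ∈ kts
  · simp [hc]
  · simp [hc]

theorem A_items (g : String → Nat) (kts : List String) :
    (kts.foldl (fun (d : PySem.Dict String Int) u =>
        if 0 < g u then d.insert u (d.getD u 0 + (g u : Int)) else d)
      PySem.Dict.empty).items =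
    ((PySem.List.dedup kts).filter (fun u => decide (0 < g u))).map
      (fun u => (u, (g u : Int) * (kts.count u : Int))) := by
  induction kts using List.reverseRecOn with
  | nil => simp [PySem.Dict.empty, PySem.List.dedup]
  | append_singleton kts x ih =>
    simp only [List.foldl_append, List.foldl_cons, List.foldl_nil]
    have hded : PySem.List.dedup (kts ++ [x]) =
        if x ∈ kts then PySem.List.dedup kts else PySem.List.dedup kts ++ [x] := by
      simp only [PySem.List.dedup_eq_ofList, PySem.Set.ofList_append_singleton,
        PySem.Set.add_eq_ite, PySem.Set.mem_ofList]
    have hcnt_ne : ∀ u : String, u ≠ x → (kts ++ [x]).count u = kts.count u := by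
      intro u hu
      rw [List.count_append]; simp [Ne.symm hu]
    by_cases hgx : 0 < g x
    · rw [if_pos hgx]
      by_cases hmem : x ∈ kts
      · -- overwrite in place
        rw [PySem.Dict.items_insert_of_contains _ _ (by rw [A_contains]; simp [hgx, hmem])]
        rw [ih, hded, if_pos hmem, List.map_map]
        apply List.map_congr_left
        intro u hu
        rcases List.mem_filter.mp hu with ⟨hud, hq⟩
        by_cases hux : u = x
        · subst hux
          simp only [Function.comp_apply, beq_self_eq_true, if_pos]
          rw [PySem.Dict.getD_eq_get?_getD, A_get? g kts u, if_pos ⟨hgx, hmem⟩]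
          rw [List.count_append]
          push_cast
          simp
          ring
        · simp only [Function.comp_apply]
          rw [if_neg (by simpa using hux), hcnt_ne u hux]
      · rw [PySem.Dict.items_insert_of_not_contains _ _
          (by rw [A_contains]; simp [hmem])]
        rw [ih, hded, if_neg hmem]
        rw [List.filter_append, List.map_append]
        have hfx : List.filter (fun u => decide (0 < g u)) [x] = [x] := by simp [hgx]
        rw [hfx]
        congr 1
        · apply List.map_congr_left
          intro u hu
          rcases List.mem_filter.mp hu with ⟨hud, hq⟩
          have hux : u ≠ x := by
            intro h; subst h
            exact hmem (by simpa using hud)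
          rw [hcnt_ne u hux]
        · simp only [List.map_cons, List.map_nil]
          rw [PySem.Dict.getD_of_not_contains _ _ (by rw [A_contains]; simp [hmem])]
          have h0 : kts.count x = 0 := List.count_eq_zero_of_not_mem hmem
          rw [List.count_append, h0]
          simp
    · rw [if_neg hgx]
      rw [ih, hded]
      have hfilt : ∀ l : List String, List.filter (fun u => decide (0 < g u)) (l ++ [x]) =
          List.filter (fun u => decide (0 < g u)) l := by
        intro l; rw [List.filter_append]; simp [hgx]
      have hmap : ∀ l : List String,
          (List.filter (fun u => decide (0 < g u)) l).map
            (fun u => (u, (g u : Int) * (kts.count u : Int))) =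
          (List.filter (fun u => decide (0 < g u)) l).map
            (fun u => (u, (g u : Int) * ((kts ++ [x]).count u : Int))) := by
        intro l
        apply List.map_congr_left
        intro u hu
        rcases List.mem_filter.mp hu with ⟨_, hq⟩
        have hux : u ≠ x := by
          intro h; subst h; exact hgx (by simpa using hq)
        rw [hcnt_ne u hux]
      split_ifs with hmem
      · rw [hmap]
      · rw [hfilt, hmap]

theorem B_items (c : String → Nat) (mult : String → Int) (us : List String) (h : us.Nodup) :
    ((us.map (fun k => (k, mult k))).foldl (fun (r : PySem.Dict String Int) p =>
        if 0 < c p.1 then r.insert p.1 ((c p.1 : Int) * p.2) else r)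
      PySem.Dict.empty).items =
    (us.filter (fun u => decide (0 < c u))).map (fun u => (u, (c u : Int) * mult u)) := by
  induction us using List.reverseRecOn with
  | nil => simp [PySem.Dict.empty]
  | append_singleton us x ih =>
    have hx : x ∉ us := by simp [List.nodup_append] at h; tauto
    have hnd : us.Nodup := (List.nodup_append.mp h).1
    simp only [List.map_append, List.map_cons, List.map_nil, List.foldl_append,
      List.foldl_cons, List.foldl_nil]
    rw [List.filter_append, List.map_append]
    by_cases hcx : 0 < c x
    · rw [if_pos hcx]
      rw [PySem.Dict.items_insert_of_not_contains _ _ ?hc]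
      case hc =>
        rw [PySem.Dict.contains_eq_decide_mem_keys]
        simp only [PySem.Dict.keys, ih hnd, List.map_map]
        simp only [decide_eq_false_iff_not]
        intro hmem
        rcases List.mem_map.mp hmem with ⟨u, hu, hequ⟩
        rcases List.mem_filter.mp hu with ⟨huus, _⟩
        simp only [Function.comp_apply] at hequ
        exact hx (hequ ▸ huus)
      rw [ih hnd]
      congr 1
      simp [hcx]
    · rw [if_neg hcx, ih hnd]
      have : List.filter (fun u => decide (0 < c u)) [x] = [] := by simp [hcx]
      rw [this]
      simp

-- main proof: both items lists equal the dedup-filter-map characterisation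
theorem search_for_terms_and_count_spec : Claim_equal_search_for_terms_and_count := by
  intro text key_terms _
  unfold Spec_search_for_terms_and_count
  unfold search_for_terms_and_count search_for_terms_and_count_alt
  simp only []
  rw [A_items (fun u => PySem.Str.count (PySem.Str.lower text) (PySem.Str.lower u)) key_terms]
  rw [PySem.Dict.foldl_insert_getD_add_one_eq_counter, PySem.Dict.items_counter]
  rw [B_items (fun u => pvCount (PySem.Str.lower text).toList (PySem.Chars.lower u.toList))
    (fun k => (key_terms.count k : Int)) (PySem.Set.ofList key_terms)
    (PySem.Set.nodup_ofList key_terms)]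
  have hg : ∀ u : String,
      pvCount (PySem.Str.lower text).toList (PySem.Chars.lower u.toList) =
      PySem.Str.count (PySem.Str.lower text) (PySem.Str.lower u) := by
    intro u
    rw [pvCount_eq_count]
    simp
  simp only [PySem.List.dedup_eq_ofList, hg]
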